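-- pv_equiv track=rewrite | github.com/hjlim7831/algorithm | 프로그래머스/lv3/84021. 퍼즐 조각 채우기/퍼즐 조각 채우기.py | chk_fit
-- ===== SOURCE A (Python) =====
-- def phase_change(tuple_set, opt):
--     tuple_list = list(tuple_set)
--     if opt == 0:
--         pass
--     elif opt == 1:
--         tuple_list = list(map(lambda x:(-x[0], -x[1]), tuple_list))
--     elif opt == 2:
--         tuple_list = list(map(lambda x:(x[1], -x[0]), tuple_list))
--     elif opt == 3:
--         tuple_list = list(map(lambda x:(-x[1], x[0]), tuple_list))
--
--     return sorted(tuple_list, key=lambda x:(x[0], x[1]))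
--
-- def chk_fit(area:set, puzzle:set)->bool:
--     if len(area) != len(puzzle):
--         return False
--     for i in range(4):
--         area_list = phase_change(area, i)
--         puzzle_list = phase_change(puzzle, 0)
--         offset_r = area_list[0][0] - puzzle_list[0][0]
--         offset_c = area_list[0][1] - puzzle_list[0][1]
--         flag = True
--         for a, p in zip(area_list[1:], puzzle_list[1:]):
--             if a[0] - p[0] != offset_r or a[1] - p[1] != offset_c:
--                 flag = False
--                 break
--         if flag:
--             return True
--     return False
-- ===== SOURCE B (Python) =====
-- # B: no sorting at all -- normalize by the bounding-box corner (componentwise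
-- # minima) and compare hash sets, rotating the point set 90 degrees at a time.
--
-- def _bbox_norm(pts):
--     rmin = min(r for r, _ in pts)
--     cmin = min(c for _, c in pts)
--     return {(r - rmin, c - cmin) for r, c in pts}
--
-- def chk_fit(area, puzzle):
--     if len(area) != len(puzzle):
--         return False
--     target = _bbox_norm(puzzle)
--     pts = set(area)
--     for _ in range(4):
--         if _bbox_norm(pts) == target:
--             return True
--         pts = {(c, -r) for r, c in pts}
--     return False
-- ===== Notes on version B (the rewrite author's own statement) =====
-- stated objective: alternative
-- what changed: B eliminates sorting entirely: it normalizes each point set by its bounding-box corner (componentwise minima) and compares hash sets, rotating the point set 90 degrees at a time, instead of A's sort-then-offset-zip-scan per rotation; Pre_ states the set-typed domain (distinct points, as the Python parameters are sets) and excludes the both-empty input, on which A raises IndexError and B ValueError.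
import Mathlib
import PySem

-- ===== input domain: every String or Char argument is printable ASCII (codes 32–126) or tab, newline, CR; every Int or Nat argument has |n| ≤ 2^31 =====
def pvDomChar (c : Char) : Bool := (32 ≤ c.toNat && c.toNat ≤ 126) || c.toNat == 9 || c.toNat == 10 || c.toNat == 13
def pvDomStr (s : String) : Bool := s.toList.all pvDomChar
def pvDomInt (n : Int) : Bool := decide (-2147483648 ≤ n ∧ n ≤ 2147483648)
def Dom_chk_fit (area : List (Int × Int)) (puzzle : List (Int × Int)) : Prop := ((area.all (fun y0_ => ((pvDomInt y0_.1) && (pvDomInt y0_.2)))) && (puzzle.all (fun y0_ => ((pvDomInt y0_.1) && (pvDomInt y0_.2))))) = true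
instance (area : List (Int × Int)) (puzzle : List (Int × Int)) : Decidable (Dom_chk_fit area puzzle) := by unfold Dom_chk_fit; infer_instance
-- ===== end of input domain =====

-- B replaces A's sort-then-offset-scan per rotation by sort-free hashing: it
-- normalizes each point set by its bounding-box corner (componentwise minima)
-- and compares hash sets, rotating the set 90 degrees at a time (objective: alternative).


-- ===== PORT A =====
def pvPhaseChange (l : List (Int × Int)) (opt : Int) : List (Int × Int) :=
  let tl : List (Int × Int) :=
    if opt = 0 then l
    else if opt = 1 then l.map (fun x => (-x.1, -x.2))
    else if opt = 2 then l.map (fun x => (x.2, -x.1))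
    else if opt = 3 then l.map (fun x => (-x.2, x.1))
    else l
  PySem.List.sorted2 tl (fun x => x.1) (fun x => x.2)

-- the inner 'for a, p in zip(...)' loop with flag/break
def pvScanA (offr offc : Int) : List ((Int × Int) × (Int × Int)) → Bool
  | [] => true
  | (a, p) :: rest =>
    if a.1 - p.1 ≠ offr ∨ a.2 - p.2 ≠ offc then false else pvScanA offr offc rest

-- the outer 'for i in range(4)' loop with early return
def pvLoopA (area puzzle : List (Int × Int)) : List Int → Bool
  | [] => false
  | i :: rest =>
    let area_list := pvPhaseChange area i
    let puzzle_list := pvPhaseChange puzzle 0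
    match area_list, puzzle_list with
    | a0 :: atl, p0 :: ptl =>
      let offset_r := a0.1 - p0.1
      let offset_c := a0.2 - p0.2
      if pvScanA offset_r offset_c (atl.zip ptl) then true
      else pvLoopA area puzzle rest
    | _, _ => false  -- area_list[0] / puzzle_list[0]: IndexError in Python; excluded by Pre_

def chk_fit (area : List (Int × Int)) (puzzle : List (Int × Int)) : Bool :=
  if area.length ≠ puzzle.length then false
  else pvLoopA area puzzle (PySem.List.pyRange 0 4 1)

-- ===== PORT B =====
-- min(xs) over a nonempty iterable of ints (the [] case is Python's ValueError, excluded by Pre_)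
def pvMinList : List Int → Int
  | [] => 0
  | x :: t => t.foldl min x

def pvBboxNorm (pts : List (Int × Int)) : PySem.Set (Int × Int) :=
  let rmin := pvMinList (pts.map Prod.fst)
  let cmin := pvMinList (pts.map Prod.snd)
  PySem.Set.ofList (pts.map (fun p => (p.1 - rmin, p.2 - cmin)))

-- 'for _ in range(4)' with early return; pts rotates 90° each iteration
def pvLoopB (target : PySem.Set (Int × Int)) (pts : PySem.Set (Int × Int)) : Nat → Bool
  | 0 => false
  | Nat.succ k =>
    if PySem.Set.equal (pvBboxNorm pts) target then true
    else pvLoopB target (PySem.Set.ofList (pts.map (fun p => (p.2, -p.1)))) k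

def chk_fit_alt (area : List (Int × Int)) (puzzle : List (Int × Int)) : Bool :=
  if area.length ≠ puzzle.length then false
  else pvLoopB (pvBboxNorm puzzle) (PySem.Set.ofList area) 4

-- ===== PRECONDITION & SPEC =====
-- The Python parameters are SETS, so Pre_ restricts to lists of distinct points
-- (the set-typed domain); it also excludes the input where both collections are
-- empty, on which A raises IndexError (and B ValueError).
def Pre_chk_fit (area : List (Int × Int)) (puzzle : List (Int × Int)) : Prop :=
  area.Nodup ∧ puzzle.Nodup ∧ ¬ (area = [] ∧ puzzle = [])
instance (area : List (Int × Int)) (puzzle : List (Int × Int)) : Decidable (Pre_chk_fit area puzzle) := by unfold Pre_chk_fit; infer_instance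

def pvWitness_chk_fit : (List (Int × Int)) × (List (Int × Int)) := ([(0, 0), (0, 1)], [(3, 4), (3, 5)])

def Spec_chk_fit (area : List (Int × Int)) (puzzle : List (Int × Int)) (out : Bool) : Prop := out = chk_fit_alt area puzzle
instance (area : List (Int × Int)) (puzzle : List (Int × Int)) (out : Bool) : Decidable (Spec_chk_fit area puzzle out) := by unfold Spec_chk_fit; infer_instance

-- ===== CLAIM (what is proved, stated in full; the proofs are below) =====
def Claim_equal_chk_fit : Prop := ∀ (area : List (Int × Int)) (puzzle : List (Int × Int)), Dom_chk_fit area puzzle → Pre_chk_fit area puzzle → Spec_chk_fit area puzzle (chk_fit area puzzle)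

-- ===== LEMMAS AND PROOFS =====

-- lexicographic (Python tuple) order on int pairs, and translation by v
def pvLexLe (a b : Int × Int) : Prop := a.1 < b.1 ∨ (a.1 = b.1 ∧ a.2 ≤ b.2)

def pvTr (v : Int × Int) (p : Int × Int) : Int × Int := (p.1 + v.1, p.2 + v.2)

-- 'X is a translate of Y'
def pvTrans (X Y : List (Int × Int)) : Prop := ∃ v : Int × Int, X.Perm (Y.map (pvTr v))

-- anchor-normalized sorted list (proof-side characterisation of A's per-rotation test)
def pvCanon (pts : List (Int × Int)) : List (Int × Int) :=
  let s := PySem.List.sorted2 pts (fun x => x.1) (fun x => x.2)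
  match s with
  | [] => []
  | (r0, c0) :: _ => s.map (fun p => (p.1 - r0, p.2 - c0))

-- A's zip-scan with offsets equals pointwise equality of the two translated tails.
theorem pvScanA_eq_map (a0 p0 : Int × Int) :
    ∀ (xs ys : List (Int × Int)), xs.length = ys.length →
      (pvScanA (a0.1 - p0.1) (a0.2 - p0.2) (xs.zip ys) = true ↔
        xs.map (fun p => (p.1 - a0.1, p.2 - a0.2)) = ys.map (fun p => (p.1 - p0.1, p.2 - p0.2))) := by

  intro xs
  induction xs with
  | nil => intro ys h; cases ys <;> simp_all [pvScanA]
  | cons x xt ih =>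
    intro ys h
    cases ys with
    | nil => simp at h
    | cons y yt =>
      simp only [List.zip_cons_cons, pvScanA, List.map_cons, List.cons.injEq]
      by_cases hc : x.1 - y.1 ≠ a0.1 - p0.1 ∨ x.2 - y.2 ≠ a0.2 - p0.2
      · simp only [hc, if_true]
        constructor
        · intro hfalse; simp at hfalse
        · rintro ⟨hpair, -⟩
          exfalso
          have h1 : x.1 - a0.1 = y.1 - p0.1 := congrArg Prod.fst hpair
          have h2 : x.2 - a0.2 = y.2 - p0.2 := congrArg Prod.snd hpair
          rcases hc with hc | hc <;> omega
      · simp only [hc, if_false]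
        push Not at hc
        rw [ih yt (by simpa using h)]
        constructor
        · intro htl
          refine ⟨?_, htl⟩
          have ⟨h1, h2⟩ := hc
          exact Prod.ext (by dsimp; omega) (by dsimp; omega)
        · rintro ⟨-, htl⟩; exact htl

-- one rotation step of A equals equality of the canonical anchor-normalized lists
theorem step_eq_canon (X Y : List (Int × Int)) (hX : X ≠ []) (hlen : X.length = Y.length) :
    (match PySem.List.sorted2 X (fun x => x.1) (fun x => x.2),
           PySem.List.sorted2 Y (fun x => x.1) (fun x => x.2) with
     | a0 :: atl, p0 :: ptl => pvScanA (a0.1 - p0.1) (a0.2 - p0.2) (atl.zip ptl)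
     | _, _ => false)
    = (pvCanon X == pvCanon Y) := by

  have hpx := PySem.List.sorted2_perm X (fun x => x.1) (fun x => x.2) false
  have hpy := PySem.List.sorted2_perm Y (fun x => x.1) (fun x => x.2) false
  have hlx : (PySem.List.sorted2 X (fun x => x.1) (fun x => x.2)).length = X.length := hpx.length_eq
  have hly : (PySem.List.sorted2 Y (fun x => x.1) (fun x => x.2)).length = Y.length := hpy.length_eq
  cases hSX : PySem.List.sorted2 X (fun x => x.1) (fun x => x.2) with
  | nil =>
    exfalso
    apply hX
    have : X.length = 0 := by rw [← hlx, hSX]; rfl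
    exact List.eq_nil_of_length_eq_zero this
  | cons a0 atl =>
    cases hSY : PySem.List.sorted2 Y (fun x => x.1) (fun x => x.2) with
    | nil =>
      exfalso
      have hy0 : Y.length = 0 := by rw [← hly, hSY]; rfl
      have hx0 : X.length = 0 := by omega
      exact hX (List.eq_nil_of_length_eq_zero hx0)
    | cons p0 ptl =>
      have hlt : atl.length = ptl.length := by
        rw [hSX] at hlx; rw [hSY] at hly
        simp at hlx hly; omega
      simp only [pvCanon, hSX, hSY]
      have hiff := pvScanA_eq_map a0 p0 atl ptl hlt
      by_cases hscan : pvScanA (a0.1 - p0.1) (a0.2 - p0.2) (atl.zip ptl) = true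
      · simp only [hscan]
        have htl := hiff.mp hscan
        have hmap : ((a0 :: atl).map (fun p => (p.1 - a0.1, p.2 - a0.2)) : List (Int × Int))
             = (p0 :: ptl).map (fun p => (p.1 - p0.1, p.2 - p0.2)) := by
          simp [htl]
        rw [hmap]
        simp
      · have hfalse : pvScanA (a0.1 - p0.1) (a0.2 - p0.2) (atl.zip ptl) = false :=
          Bool.eq_false_iff.mpr hscan
        simp only [hfalse]
        have hnetl : List.map (fun p => (p.1 - a0.1, p.2 - a0.2)) atl
             ≠ List.map (fun p => (p.1 - p0.1, p.2 - p0.2)) ptl :=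
          fun h => hscan (hiff.mpr h)
        simp [hnetl]

theorem insertBy_pairwise {α : Type} (ltb : α → α → Bool) (le : α → α → Prop)
    (h1 : ∀ a b, ltb a b = true → le a b) (h2 : ∀ a b, ltb a b = false → le b a)
    (htr : ∀ a b c, le a b → le b c → le a c) (x : α) :
    ∀ acc : List α, acc.Pairwise le → (PySem.List.insertBy ltb x acc).Pairwise le := by
  intro acc
  induction acc with
  | nil => intro _; simp [PySem.List.insertBy]
  | cons y ys ih =>
    intro hp
    rw [List.pairwise_cons] at hp
    simp only [PySem.List.insertBy]
    by_cases hb : ltb x y = true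
    · simp only [hb, if_true]
      refine List.Pairwise.cons ?_ (List.Pairwise.cons hp.1 hp.2)
      intro z hz
      rcases List.mem_cons.mp hz with rfl | hz'
      · exact h1 x z hb
      · exact htr _ _ _ (h1 x y hb) (hp.1 z hz')
    · simp only [hb]
      refine List.Pairwise.cons ?_ (ih hp.2)
      intro z hz
      rw [PySem.List.mem_insertBy] at hz
      rcases hz with hzx | hz'
      · rw [hzx]; exact h2 x y (Bool.eq_false_iff.mpr hb)
      · exact hp.1 z hz'

theorem pairwise_sorted2 (xs : List (Int × Int)) :
    (PySem.List.sorted2 xs (fun x => x.1) (fun x => x.2) false).Pairwise pvLexLe := by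
  show (List.foldl (fun acc x => PySem.List.insertBy
      (fun a b => decide (a.1 < b.1) || (!decide (b.1 < a.1) && decide (a.2 < b.2))) x acc) [] xs).Pairwise pvLexLe
  have key : ∀ (l : List (Int × Int)) (acc : List (Int × Int)), acc.Pairwise pvLexLe →
      (List.foldl (fun acc x => PySem.List.insertBy
        (fun a b => decide (a.1 < b.1) || (!decide (b.1 < a.1) && decide (a.2 < b.2))) x acc) acc l).Pairwise pvLexLe := by
    intro l
    induction l with
    | nil => intro acc h; simpa using h
    | cons x t ih =>
      intro acc h
      refine ih _ ?_
      apply insertBy_pairwise _ pvLexLe ?_ ?_ ?_ x acc h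
      · intro a b hab
        simp only [Bool.or_eq_true, Bool.and_eq_true, Bool.not_eq_true', decide_eq_true_eq, decide_eq_false_iff_not] at hab
        unfold pvLexLe
        omega
      · intro a b hab
        simp only [Bool.or_eq_false_iff, Bool.and_eq_false_iff, Bool.not_eq_false', decide_eq_true_eq, decide_eq_false_iff_not] at hab
        unfold pvLexLe
        omega
      · intro a b c hab hbc
        unfold pvLexLe at hab hbc ⊢
        omega
  exact key xs [] (by simp)


theorem sorted2_unique (xs ys : List (Int × Int)) (hp : ys.Perm xs) (hs : ys.Pairwise pvLexLe) :
    PySem.List.sorted2 xs (fun x => x.1) (fun x => x.2) false = ys := by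
  refine List.Perm.eq_of_pairwise ?_ (pairwise_sorted2 xs) hs
    ((PySem.List.sorted2_perm xs _ _ false).trans hp.symm)
  intro a b _ _ hab hba
  unfold pvLexLe at hab hba
  have h1 : a.1 = b.1 := by omega
  have h2 : a.2 = b.2 := by omega
  exact Prod.ext h1 h2

theorem canon_eq_iff_trans (X Y : List (Int × Int)) (hX : X ≠ []) (hY : Y ≠ []) :
    pvCanon X = pvCanon Y ↔ pvTrans X Y := by
  have hpx := PySem.List.sorted2_perm X (fun x => x.1) (fun x => x.2) false
  have hpy := PySem.List.sorted2_perm Y (fun x => x.1) (fun x => x.2) false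
  cases hSX : PySem.List.sorted2 X (fun x => x.1) (fun x => x.2) with
  | nil => exact absurd (List.Perm.eq_nil (hSX ▸ hpx).symm) hX
  | cons a0 atl =>
  cases hSY : PySem.List.sorted2 Y (fun x => x.1) (fun x => x.2) with
  | nil => exact absurd (List.Perm.eq_nil (hSY ▸ hpy).symm) hY
  | cons p0 ptl =>
  obtain ⟨a1, a2⟩ := a0
  obtain ⟨q1, q2⟩ := p0
  constructor
  · intro hc
    simp only [pvCanon, hSX, hSY] at hc
    refine ⟨((a1, a2).1 - (q1, q2).1, (a1, a2).2 - (q1, q2).2), ?_⟩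
    have hid : ((fun q : Int × Int => (q.1 + (a1, a2).1, q.2 + (a1, a2).2)) ∘ (fun p : Int × Int => (p.1 - (a1, a2).1, p.2 - (a1, a2).2))) = id := by
      funext p; apply Prod.ext <;> simp
    have hfr : ((fun q : Int × Int => (q.1 + (a1, a2).1, q.2 + (a1, a2).2)) ∘ (fun p : Int × Int => (p.1 - (q1, q2).1, p.2 - (q1, q2).2))) = pvTr ((a1, a2).1 - (q1, q2).1, (a1, a2).2 - (q1, q2).2) := by
      funext p; apply Prod.ext <;> simp [pvTr] <;> ring
    have hmapeq : (a1, a2) :: atl = ((q1, q2) :: ptl).map (pvTr ((a1, a2).1 - (q1, q2).1, (a1, a2).2 - (q1, q2).2)) := by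
      have h2 := congrArg (List.map (fun q : Int × Int => (q.1 + (a1, a2).1, q.2 + (a1, a2).2))) hc
      simp only [List.map_map, hid, hfr, List.map_id] at h2
      exact h2
    have h3 : X.Perm (((q1, q2) :: ptl).map (pvTr ((a1, a2).1 - (q1, q2).1, (a1, a2).2 - (q1, q2).2))) := hmapeq ▸ (hSX ▸ hpx).symm
    exact h3.trans (List.Perm.map _ (hSY ▸ hpy))
  · rintro ⟨v, hperm⟩
    have hpair : (((q1, q2) :: ptl).map (pvTr v)).Pairwise pvLexLe := by
      refine List.Pairwise.map _ ?_ (hSY ▸ pairwise_sorted2 Y)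
      intro a b hab
      unfold pvLexLe at hab ⊢
      unfold pvTr
      dsimp
      omega
    have hperm2 : (((q1, q2) :: ptl).map (pvTr v)).Perm X :=
      (List.Perm.map _ (hSY ▸ hpy)).trans hperm.symm
    have hsx2 : PySem.List.sorted2 X (fun x => x.1) (fun x => x.2) false = ((q1, q2) :: ptl).map (pvTr v) :=
      sorted2_unique X _ hperm2 hpair
    have hcons : (a1, a2) :: atl = ((q1, q2) :: ptl).map (pvTr v) := by rw [← hSX]; exact hsx2
    have ha0 : (a1, a2) = pvTr v (q1, q2) := by
      have := congrArg (fun l => l.headI) hcons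
      simpa using this
    obtain ⟨hv1, hv2⟩ := Prod.ext_iff.mp ha0
    simp only [pvTr] at hv1 hv2
    simp only [pvCanon, hSX, hSY]
    rw [hcons, List.map_map]
    congr 1
    funext p
    apply Prod.ext <;> simp [pvTr] <;> omega


theorem pvMinList_spec (l : List Int) (h : l ≠ []) :
    pvMinList l ∈ l ∧ ∀ y ∈ l, pvMinList l ≤ y := by
  cases l with
  | nil => exact absurd rfl h
  | cons x t =>
    have hm := PySem.List.foldl_min_mem t x
    have hle := PySem.List.foldl_min_le t x
    refine ⟨?_, ?_⟩
    · rcases hm with hm | hm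
      · rw [pvMinList, hm]; exact List.mem_cons_self
      · exact List.mem_cons_of_mem _ hm
    · intro y hy
      rcases List.mem_cons.mp hy with rfl | hy
      · exact hle.1
      · exact hle.2 y hy

theorem pvMinList_perm (l l' : List Int) (h : l.Perm l') (hne : l ≠ []) :
    pvMinList l = pvMinList l' := by
  have hne' : l' ≠ [] := by intro h0; rw [h0] at h; exact hne h.eq_nil
  obtain ⟨hm1, hl1⟩ := pvMinList_spec l hne
  obtain ⟨hm2, hl2⟩ := pvMinList_spec l' hne'
  exact le_antisymm (hl1 _ (h.symm.mem_iff.mp hm2)) (hl2 _ (h.mem_iff.mp hm1))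

theorem pvMinList_map_add (l : List Int) (c : Int) (hne : l ≠ []) :
    pvMinList (l.map (· + c)) = pvMinList l + c := by
  cases l with
  | nil => exact absurd rfl hne
  | cons x t =>
    show (t.map (· + c)).foldl min (x + c) = t.foldl min x + c
    induction t generalizing x with
    | nil => rfl
    | cons y t ih => simp only [List.map_cons, List.foldl_cons, min_add_add_right]; exact ih (min x y) (by simp)


theorem sub_inj (a b : Int) : Function.Injective (fun p : Int × Int => (p.1 - a, p.2 - b)) := by
  intro p q h
  obtain ⟨h1, h2⟩ := Prod.ext_iff.mp h
  dsimp at h1 h2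
  exact Prod.ext (by omega) (by omega)

theorem bbox_eq_iff_trans (X Y : List (Int × Int)) (hX : X.Nodup) (hY : Y.Nodup)
    (hneX : X ≠ []) (hneY : Y ≠ []) :
    PySem.Set.equal (pvBboxNorm X) (pvBboxNorm Y) = true ↔ pvTrans X Y := by
  set mXr := pvMinList (X.map Prod.fst) with hmXr
  set mXc := pvMinList (X.map Prod.snd) with hmXc
  set mYr := pvMinList (Y.map Prod.fst) with hmYr
  set mYc := pvMinList (Y.map Prod.snd) with hmYc
  have hnx : (X.map (fun p : Int × Int => (p.1 - mXr, p.2 - mXc))).Nodup := hX.map (sub_inj _ _)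
  have hny : (Y.map (fun p : Int × Int => (p.1 - mYr, p.2 - mYc))).Nodup := hY.map (sub_inj _ _)
  have hbx : pvBboxNorm X = X.map (fun p : Int × Int => (p.1 - mXr, p.2 - mXc)) := by
    simp only [pvBboxNorm]
    exact PySem.Set.ofList_eq_self_of_nodup _ hnx
  have hby : pvBboxNorm Y = Y.map (fun p : Int × Int => (p.1 - mYr, p.2 - mYc)) := by
    simp only [pvBboxNorm]
    exact PySem.Set.ofList_eq_self_of_nodup _ hny
  rw [hbx, hby, PySem.Set.equal_iff]
  rw [← List.perm_ext_iff_of_nodup hnx hny]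
  constructor
  · intro hperm
    refine ⟨(mXr - mYr, mXc - mYc), ?_⟩
    have h2 := hperm.map (fun q : Int × Int => (q.1 + mXr, q.2 + mXc))
    rw [List.map_map, List.map_map] at h2
    have hidX : ((fun q : Int × Int => (q.1 + mXr, q.2 + mXc)) ∘ (fun p : Int × Int => (p.1 - mXr, p.2 - mXc))) = id := by
      funext p; apply Prod.ext <;> simp
    have hcY : ((fun q : Int × Int => (q.1 + mXr, q.2 + mXc)) ∘ (fun p : Int × Int => (p.1 - mYr, p.2 - mYc))) = pvTr (mXr - mYr, mXc - mYc) := by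
      funext p; apply Prod.ext <;> simp [pvTr] <;> ring
    rw [hidX, hcY, List.map_id] at h2
    exact h2
  · rintro ⟨v, hp⟩
    have hfst : (X.map Prod.fst).Perm ((Y.map Prod.fst).map (· + v.1)) := by
      have := hp.map Prod.fst
      rw [List.map_map] at this
      rw [List.map_map]
      exact this
    have hsnd : (X.map Prod.snd).Perm ((Y.map Prod.snd).map (· + v.2)) := by
      have := hp.map Prod.snd
      rw [List.map_map] at this
      rw [List.map_map]
      exact this
    have hYfne : Y.map Prod.fst ≠ [] := by simp [hneY]
    have hYsne : Y.map Prod.snd ≠ [] := by simp [hneY]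
    have hXfne : X.map Prod.fst ≠ [] := by simp [hneX]
    have hXsne : X.map Prod.snd ≠ [] := by simp [hneX]
    have hmr : mXr = mYr + v.1 := by
      rw [hmXr, pvMinList_perm _ _ hfst hXfne, pvMinList_map_add _ _ hYfne]
    have hmc : mXc = mYc + v.2 := by
      rw [hmXc, pvMinList_perm _ _ hsnd hXsne, pvMinList_map_add _ _ hYsne]
    have h2 := hp.map (fun p : Int × Int => (p.1 - mXr, p.2 - mXc))
    rw [List.map_map] at h2
    have hcomp : ((fun p : Int × Int => (p.1 - mXr, p.2 - mXc)) ∘ pvTr v) = (fun p : Int × Int => (p.1 - mYr, p.2 - mYc)) := by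
      funext p; apply Prod.ext <;> simp [pvTr] <;> omega
    rw [hcomp] at h2
    exact h2


-- one rotation step of A equals B's bounding-box set comparison
theorem step_eq_set (X Y : List (Int × Int)) (hX : X.Nodup) (hY : Y.Nodup)
    (hneX : X ≠ []) (hneY : Y ≠ []) (hlen : X.length = Y.length) :
    (match PySem.List.sorted2 X (fun x => x.1) (fun x => x.2),
           PySem.List.sorted2 Y (fun x => x.1) (fun x => x.2) with
     | a0 :: atl, p0 :: ptl => pvScanA (a0.1 - p0.1) (a0.2 - p0.2) (atl.zip ptl)
     | _, _ => false)
    = PySem.Set.equal (pvBboxNorm X) (pvBboxNorm Y) := by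
  rw [step_eq_canon X Y hneX hlen]
  apply Bool.eq_iff_iff.mpr
  rw [beq_iff_eq]
  exact (canon_eq_iff_trans X Y hneX hneY).trans (bbox_eq_iff_trans X Y hX hY hneX hneY).symm

-- the same with the rest of A's rotation loop carried along as r
theorem step_eq_set_or (X Y : List (Int × Int)) (r : Bool) (hX : X.Nodup) (hY : Y.Nodup)
    (hneX : X ≠ []) (hneY : Y ≠ []) (hlen : X.length = Y.length) :
    (match PySem.List.sorted2 X (fun x => x.1) (fun x => x.2),
           PySem.List.sorted2 Y (fun x => x.1) (fun x => x.2) with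
     | a0 :: atl, p0 :: ptl => pvScanA (a0.1 - p0.1) (a0.2 - p0.2) (atl.zip ptl) || r
     | _, _ => false)
    = (PySem.Set.equal (pvBboxNorm X) (pvBboxNorm Y) || r) := by
  have hcore := step_eq_set X Y hX hY hneX hneY hlen
  have hlx : (PySem.List.sorted2 X (fun x => x.1) (fun x => x.2)).length = X.length :=
    (PySem.List.sorted2_perm X (fun x => x.1) (fun x => x.2) false).length_eq
  have hly : (PySem.List.sorted2 Y (fun x => x.1) (fun x => x.2)).length = Y.length :=
    (PySem.List.sorted2_perm Y (fun x => x.1) (fun x => x.2) false).length_eq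
  cases hSX : PySem.List.sorted2 X (fun x => x.1) (fun x => x.2) with
  | nil =>
    exfalso
    apply hneX
    have : X.length = 0 := by rw [← hlx, hSX]; rfl
    exact List.eq_nil_of_length_eq_zero this
  | cons a0 atl =>
    cases hSY : PySem.List.sorted2 Y (fun x => x.1) (fun x => x.2) with
    | nil =>
      exfalso
      have hy0 : Y.length = 0 := by rw [← hly, hSY]; rfl
      have hx0 : X.length = 0 := by omega
      exact hneX (List.eq_nil_of_length_eq_zero hx0)
    | cons p0 ptl =>
      rw [hSX, hSY] at hcore
      simp only at hcore ⊢
      rw [hcore]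

theorem rot_inj : Function.Injective (fun p : Int × Int => (p.2, -p.1)) := by
  intro p q h
  obtain ⟨h1, h2⟩ := Prod.ext_iff.mp h
  dsimp at h1 h2
  exact Prod.ext (by omega) (by omega)

-- ===== VERDICT (by name: the statement is the Claim_ definition above) =====
theorem chk_fit_spec : Claim_equal_chk_fit := by
  intro area puzzle _hdom hpre
  obtain ⟨hnda, hndp, hpre⟩ := hpre
  unfold Spec_chk_fit chk_fit chk_fit_alt
  by_cases hlen : area.length = puzzle.length
  · simp only [hlen, ne_eq, not_true_eq_false, if_false]
    have harea : area ≠ [] := by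
      intro h0
      apply hpre
      refine ⟨h0, ?_⟩
      have : puzzle.length = 0 := by rw [← hlen, h0]; rfl
      exact List.eq_nil_of_length_eq_zero this
    have hpuz : puzzle ≠ [] := by
      intro h0
      apply hpre
      refine ⟨?_, h0⟩
      have : area.length = 0 := by rw [hlen, h0]; rfl
      exact List.eq_nil_of_length_eq_zero this
    have hrange : PySem.List.pyRange 0 4 1 = [0, 1, 2, 3] := by decide
    rw [hrange]
    -- the four rotated copies of area, with nodup / nonempty / length facts
    have hmlen : ∀ (f : (Int × Int) → (Int × Int)), (area.map f).length = puzzle.length := by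
      intro f; simpa using hlen
    have hmne : ∀ (f : (Int × Int) → (Int × Int)), area.map f ≠ [] := by
      intro f; simp [harea]
    have hneg_inj : Function.Injective (fun p : Int × Int => (-p.1, -p.2)) := by
      intro p q h
      obtain ⟨h1, h2⟩ := Prod.ext_iff.mp h
      exact Prod.ext (by dsimp at h1; omega) (by dsimp at h2; omega)
    have hrot3_inj : Function.Injective (fun p : Int × Int => (-p.2, p.1)) := by
      intro p q h
      obtain ⟨h1, h2⟩ := Prod.ext_iff.mp h
      exact Prod.ext (by dsimp at h2; omega) (by dsimp at h1; omega)
    -- A's side: four sorted-offset-scan steps become bounding-box set comparisons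
    simp only [pvLoopA, pvPhaseChange]
    norm_num
    rw [step_eq_set (area.map fun p => (-p.2, p.1)) puzzle (hnda.map hrot3_inj) hndp (hmne _) hpuz (hmlen _)]
    rw [step_eq_set_or (area.map fun p => (p.2, -p.1)) puzzle _ (hnda.map rot_inj) hndp (hmne _) hpuz (hmlen _)]
    rw [step_eq_set_or (area.map fun p => (-p.1, -p.2)) puzzle _ (hnda.map hneg_inj) hndp (hmne _) hpuz (hmlen _)]
    rw [step_eq_set_or area puzzle _ hnda hndp harea hpuz hlen]
    -- B's side: unfold the four iterations and identify the rotated set lists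
    have hS0 : PySem.Set.ofList area = area := PySem.Set.ofList_eq_self_of_nodup area hnda
    have hS1 : PySem.Set.ofList (area.map fun p : Int × Int => (p.2, -p.1))
        = area.map (fun p : Int × Int => (p.2, -p.1)) :=
      PySem.Set.ofList_eq_self_of_nodup _ (hnda.map rot_inj)
    have hS2 : PySem.Set.ofList ((area.map fun p : Int × Int => (p.2, -p.1)).map (fun p : Int × Int => (p.2, -p.1)))
        = area.map (fun p : Int × Int => (-p.1, -p.2)) := by
      rw [List.map_map]
      have hc : ((fun p : Int × Int => (p.2, -p.1)) ∘ (fun p : Int × Int => (p.2, -p.1)))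
          = (fun p : Int × Int => (-p.1, -p.2)) := by
        funext p; apply Prod.ext <;> simp
      rw [hc]
      exact PySem.Set.ofList_eq_self_of_nodup _ (hnda.map hneg_inj)
    have hS3 : PySem.Set.ofList ((area.map fun p : Int × Int => (-p.1, -p.2)).map (fun p : Int × Int => (p.2, -p.1)))
        = area.map (fun p : Int × Int => (-p.2, p.1)) := by
      rw [List.map_map]
      have hc : ((fun p : Int × Int => (p.2, -p.1)) ∘ (fun p : Int × Int => (-p.1, -p.2)))
          = (fun p : Int × Int => (-p.2, p.1)) := by
        funext p; apply Prod.ext <;> simp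
      rw [hc]
      exact PySem.Set.ofList_eq_self_of_nodup _ (hnda.map hrot3_inj)
    simp only [pvLoopB, hS0, hS1, hS2, hS3]
    -- both sides are ORs of the same four booleans, in a different order
    cases hb0 : PySem.Set.equal (pvBboxNorm area) (pvBboxNorm puzzle) <;>
      cases hb1 : PySem.Set.equal (pvBboxNorm (area.map fun p : Int × Int => (-p.1, -p.2))) (pvBboxNorm puzzle) <;>
        cases hb2 : PySem.Set.equal (pvBboxNorm (area.map fun p : Int × Int => (p.2, -p.1))) (pvBboxNorm puzzle) <;>
          simp
  · simp [hlen]
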